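-- pv_equiv track=rewrite | github.com/Tailen/Grammatical-Error-Correction | m2_to_parallel.py | m2_to_correct
-- ===== SOURCE A (Python) =====
-- def parse_annotation(annotation):
--     splitted_annotation = annotation.split("|||")
--     st_idx, end_idx = [int(i) for i in splitted_annotation[0].split()[1:]]
--     operation_error = splitted_annotation[1].split(":")
--     if len(operation_error) > 2:
--         operation, error = operation_error[0], ":".join(operation_error[1:])
--     elif len(operation_error) == 2:
--         operation, error = operation_error
--     else:
--         if "UNK" in operation_error or "noop" in operation_error:
--             operation = ""
--             error = ""
--
--     edit = splitted_annotation[2]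
--     if operation == "U": opOrder=1
--     elif operation == "R": opOrder=2
--     elif operation == "M": opOrder=3
--     else: opOrder = 4
--
--     return opOrder, st_idx, end_idx, operation, error, edit
--
-- def m2_to_correct(sent, annotations):
--     tokens = sent.split()[1:]  # avoid the label "S"
--     tokens_copy = tokens.copy()
--     annotations_modifed = []
--     for annotation in annotations:
--         opOrder, st_idx, end_idx, operation, error, edit = parse_annotation(annotation)
--         annotations_modifed.append((opOrder, st_idx,  end_idx, operation, error, edit))
--
--     annotations_modifed = sorted(annotations_modifed, key=lambda x: x[0])
--     for annot in annotations_modifed: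
--         start_index = annot[1]
--         end_index = annot[2]
--         diff = end_index - start_index
--         if annot[3] == "R":
--             replacer = annot[5].strip().split()
--             if diff - len(replacer) <= 0:
--                 div = len(replacer)//diff
--                 res = [replacer[i:i + div] for i in range(0, len(replacer), div)]
--                 replacer = [' '.join(i) for i in res]
--             else:
--                 replacer = replacer + ((diff-len(replacer))*[""])
--             tokens_copy[start_index:end_index] = replacer
--         elif annot[3] == "U":
--             tokens_copy[start_index:end_index] = [''] * diff
--         elif annot[3] == "M":
--             tokens_copy.insert(start_index, annot[5])
--     edited_sentence = ' '.join(i for i in tokens_copy if i)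
--     original_sent = ' '.join(tokens)
--
--     return original_sent, edited_sentence
-- ===== SOURCE B (Python) =====
-- def _splice(lst, s, e, repl):
--     # pure equivalent of the statement  lst[s:e] = repl  (clamping via slice.indices)
--     a, b, _ = slice(s, e).indices(len(lst))
--     return lst[:a] + repl + lst[max(a, b):]
--
--
-- def _chunks(words, size):
--     if not words:
--         return []
--     return [' '.join(words[:size])] + _chunks(words[size:], size)
--
--
-- def _replacement(d, text):
--     words = text.strip().split()
--     if d <= 0:
--         return []
--     if len(words) >= d:
--         return _chunks(words, len(words) // d)
--     return words + [''] * (d - len(words))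
--
--
-- def _parse(ann):
--     fields = ann.split("|||")
--     _, s, e = fields[0].split()
--     typ = fields[1].split(":")
--     return (typ[0] if len(typ) > 1 else "", int(s), int(e), fields[2])
--
--
-- def _u_edit(s, e):
--     return lambda l: _splice(l, s, e, [''] * (e - s))
--
--
-- def _r_edit(s, e, text):
--     return lambda l: _splice(l, s, e, _replacement(e - s, text))
--
--
-- def _m_edit(s, text):
--     return lambda l: _splice(l, s, s, [text])
--
--
-- def _then(f, g):
--     return lambda l: g(f(l))
--
--
-- def m2_to_correct(sent, annotations):
--     tokens = sent.split()[1:]  # avoid the label "S"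
--     fu = fr = fm = lambda l: l
--     for ann in annotations:
--         op, s, e, text = _parse(ann)
--         if op == 'U':
--             fu = _then(fu, _u_edit(s, e))
--         elif op == 'R':
--             fr = _then(fr, _r_edit(s, e, text))
--         elif op == 'M':
--             fm = _then(fm, _m_edit(s, text))
--     final = fm(fr(fu(tokens)))
--     return ' '.join(tokens), ' '.join(t for t in final if t)
-- ===== Notes on version B (the rewrite author's own statement) =====
-- stated objective: alternative
-- what changed: B drops the opOrder key, the stable sort and all in-place list mutation: a single traversal of the annotations accumulates three deferred edit closures (one per edit kind), which are then composed and applied to the token list using one pure splice primitive (slice-index normalisation + concatenation) for all three edit kinds, with the replacement chunking done by a greedy recursion instead of range-stepped slicing.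
import Mathlib
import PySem

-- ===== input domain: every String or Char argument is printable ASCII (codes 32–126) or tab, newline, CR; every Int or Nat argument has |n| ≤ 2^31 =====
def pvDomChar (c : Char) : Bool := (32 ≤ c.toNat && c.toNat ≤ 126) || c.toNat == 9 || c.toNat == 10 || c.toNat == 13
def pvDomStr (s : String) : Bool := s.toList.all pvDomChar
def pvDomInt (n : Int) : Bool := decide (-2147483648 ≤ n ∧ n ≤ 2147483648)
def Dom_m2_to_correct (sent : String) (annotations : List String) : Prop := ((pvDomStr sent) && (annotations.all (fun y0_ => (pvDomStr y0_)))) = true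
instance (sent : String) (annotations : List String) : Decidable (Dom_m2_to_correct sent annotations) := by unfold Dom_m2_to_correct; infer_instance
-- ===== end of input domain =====

-- B replaces the opOrder/stable-sort/in-place-mutation pipeline by one traversal of the annotations
-- that accumulates three deferred edit closures, applied via a single pure splice primitive
-- (objective: alternative decomposition; same return value).


-- ===== PORT A =====
-- exact Python list-slice assignment xs[a:b] = repl (indices clamped, stop floored at start)
def setSlice (xs : List String) (a b : Int) (repl : List String) : List String :=
  let a' := PySem.List.clampIdx xs.length a
  let b' := max a' (PySem.List.clampIdx xs.length b)
  xs.take a' ++ repl ++ xs.drop b'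

-- the replacer computation of A's "R" branch (range-stepped slicing)
def mkReplacer (diff : Int) (edit : String) : List String :=
  let replacer := PySem.Str.split₀ (PySem.Str.strip edit)
  if diff - (replacer.length : Int) ≤ 0 then
    let dv := PySem.Int.floordiv (replacer.length : Int) diff
    ((PySem.List.pyRange 0 (replacer.length : Int) dv).map
      (fun i => PySem.List.slice replacer (some i) (some (i + dv)))).map
      (fun g => PySem.Str.join " " g)
  else
    replacer ++ List.replicate (diff - (replacer.length : Int)).toNat ""

-- parse_annotation; none = the Python raises (IndexError / unpack ValueError / int() / NameError)
def parse_annotation (annotation : String) : Option (Int × Int × Int × String × String × String) :=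
  let sp := (PySem.Str.split? annotation "|||").getD []
  match sp[0]?, sp[1]?, sp[2]? with
  | some f0, some f1, some edit =>
    match PySem.List.slice (PySem.Str.split₀ f0) (some 1) none with
    | [a, b] =>
      match PySem.Int.ofStr? a, PySem.Int.ofStr? b with
      | some st, some en =>
        let oe := (PySem.Str.split? f1 ":").getD []
        let opErr? : Option (String × String) :=
          if 2 < oe.length then some (oe.getD 0 "", PySem.Str.join ":" (oe.drop 1))
          else if oe.length = 2 then some (oe.getD 0 "", oe.getD 1 "")
          else if "UNK" ∈ oe ∨ "noop" ∈ oe then some ("", "")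
          else none
        match opErr? with
        | some (operation, error) =>
          let opOrder : Int :=
            if operation = "U" then 1 else if operation = "R" then 2
            else if operation = "M" then 3 else 4
          some (opOrder, st, en, operation, error, edit)
        | none => none
      | _, _ => none
    | _ => none
  | _, _, _ => none

-- the body of A's application loop
def applyAnnot (tc : List String) (annot : Int × Int × Int × String × String × String) : List String :=
  let startIndex := annot.2.1
  let endIndex := annot.2.2.1
  let diff := endIndex - startIndex
  if annot.2.2.2.1 = "R" then setSlice tc startIndex endIndex (mkReplacer diff annot.2.2.2.2.2)
  else if annot.2.2.2.1 = "U" then setSlice tc startIndex endIndex (List.replicate diff.toNat "")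
  else if annot.2.2.2.1 = "M" then PySem.List.insert tc startIndex annot.2.2.2.2.2
  else tc

def m2_to_correct (sent : String) (annotations : List String) : String × String :=
  let tokens := PySem.List.slice (PySem.Str.split₀ sent) (some 1) none
  let annotationsModified := annotations.filterMap parse_annotation
  let sortedAnnots := PySem.List.sorted annotationsModified (fun x => x.1) false
  let tokensCopy := sortedAnnots.foldl applyAnnot tokens
  (PySem.Str.join " " tokens, PySem.Str.join " " (tokensCopy.filter (fun i => i ≠ "")))

-- ===== PORT B =====
-- B's pure splice primitive: the value of  lst[s:e] = repl  as slice-normalised concatenation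
def bSplice (lst : List String) (s e : Int) (repl : List String) : List String :=
  let a := PySem.List.clampIdx lst.length s
  let b := max a (PySem.List.clampIdx lst.length e)
  lst.take a ++ repl ++ lst.drop b

-- termination fact for bChunks (cited in its decreasing_by)
lemma chunk_dec (ws : List String) (size : Int) (h : ¬(ws = [] ∨ size ≤ 0)) :
    (PySem.List.slice ws (some size) none).length < ws.length := by
  push_neg at h
  rw [PySem.List.slice_some_none, List.length_drop]
  have hw : ws.length ≠ 0 := fun hn => h.1 (List.eq_nil_of_length_eq_zero hn)
  simp only [PySem.List.clampIdx]
  split_ifs <;> omega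

-- B's greedy recursive chunker: ' '.join of the first `size` words, then recurse on the rest
def bChunks (ws : List String) (size : Int) : List String :=
  if h : ws = [] ∨ size ≤ 0 then []
  else
    PySem.Str.join " " (PySem.List.slice ws none (some size)) ::
      bChunks (PySem.List.slice ws (some size) none) size
termination_by ws.length
decreasing_by exact chunk_dec ws size h

-- B's replacement list for an R edit over a span of length d
def bReplacement (d : Int) (text : String) : List String :=
  let words := PySem.Str.split₀ (PySem.Str.strip text)
  if d ≤ 0 then []
  else if d ≤ (words.length : Int) then bChunks words (PySem.Int.floordiv (words.length : Int) d)
  else words ++ List.replicate (d - (words.length : Int)).toNat ""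

-- B's parse: (operation, start, end, edit-text); none = the Python raises
def parse_b (ann : String) : Option (String × Int × Int × String) :=
  let fields := (PySem.Str.split? ann "|||").getD []
  match fields[0]?, fields[1]?, fields[2]? with
  | some f0, some f1, some text =>
    match PySem.Str.split₀ f0 with
    | [_, s, e] =>
      match PySem.Int.ofStr? s, PySem.Int.ofStr? e with
      | some si, some ei =>
        let typ := (PySem.Str.split? f1 ":").getD []
        some ((if 1 < typ.length then typ.getD 0 "" else ""), si, ei, text)
      | _, _ => none
    | _ => none
  | _, _, _ => none

-- one traversal step: extend the deferred closure of the edit's kind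
def bStep
    (acc : (List String → List String) × (List String → List String) × (List String → List String))
    (ed : String × Int × Int × String) :
    (List String → List String) × (List String → List String) × (List String → List String) :=
  if ed.1 = "U" then
    (fun l => bSplice (acc.1 l) ed.2.1 ed.2.2.1 (List.replicate (ed.2.2.1 - ed.2.1).toNat ""),
      acc.2.1, acc.2.2)
  else if ed.1 = "R" then
    (acc.1,
      fun l => bSplice (acc.2.1 l) ed.2.1 ed.2.2.1 (bReplacement (ed.2.2.1 - ed.2.1) ed.2.2.2),
      acc.2.2)
  else if ed.1 = "M" then
    (acc.1, acc.2.1, fun l => bSplice (acc.2.2 l) ed.2.1 ed.2.1 [ed.2.2.2])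
  else acc

def m2_to_correct_alt (sent : String) (annotations : List String) : String × String :=
  let tokens := PySem.List.slice (PySem.Str.split₀ sent) (some 1) none
  let fs := (annotations.filterMap parse_b).foldl bStep (fun l => l, fun l => l, fun l => l)
  let final := fs.2.2 (fs.2.1 (fs.1 tokens))
  (PySem.Str.join " " tokens, PySem.Str.join " " (final.filter (fun t => t ≠ "")))

-- ===== PRECONDITION & SPEC =====
-- annOk a = true exactly when A parses and applies annotation a without raising:
-- ≥ 3 "|||"-fields, exactly two int-parseable indices, an operation (or a bare "UNK"/"noop"),
-- and for an "R" edit a span/replacer combination avoiding ZeroDivisionError ('div = len//0')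
-- and ValueError ('range(0, 0, 0)').
def annOk (a : String) : Bool :=
  let sp := (PySem.Str.split? a "|||").getD []
  let fs := PySem.Str.split₀ (sp.getD 0 "")
  let oe := (PySem.Str.split? (sp.getD 1 "") ":").getD []
  3 ≤ sp.length &&
  fs.length = 3 &&
  (PySem.Int.ofStr? (fs.getD 1 "")).isSome &&
  (PySem.Int.ofStr? (fs.getD 2 "")).isSome &&
  (2 ≤ oe.length || sp.getD 1 "" = "UNK" || sp.getD 1 "" = "noop") &&
  (!(2 ≤ oe.length && oe.getD 0 "" = "R") ||
    (let st := (PySem.Int.ofStr? (fs.getD 1 "")).getD 0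
     let en := (PySem.Int.ofStr? (fs.getD 2 "")).getD 0
     decide (st < en) ||
       (decide (en < st) && !(PySem.Str.split₀ (PySem.Str.strip (sp.getD 2 "")) = []))))

-- Pre_ excludes exactly the annotation lists on which the Python A raises an exception.
def Pre_m2_to_correct (sent : String) (annotations : List String) : Prop :=
  ∀ a ∈ annotations, annOk a = true
instance (sent : String) (annotations : List String) : Decidable (Pre_m2_to_correct sent annotations) := by
  unfold Pre_m2_to_correct; infer_instance

def pvWitness_m2_to_correct : String × List String :=
  ("S I has a dog", ["A 1 2|||R:VERB|||have", "A 0 0|||M:PRON|||He"])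

def Spec_m2_to_correct (sent : String) (annotations : List String) (out : String × String) : Prop :=
  out = m2_to_correct_alt sent annotations
instance (sent : String) (annotations : List String) (out : String × String) : Decidable (Spec_m2_to_correct sent annotations out) := by
  unfold Spec_m2_to_correct; infer_instance

-- ===== CLAIM (what is proved, stated in full; the proofs are below) =====
def Claim_equal_m2_to_correct : Prop := ∀ (sent : String) (annotations : List String), Dom_m2_to_correct sent annotations → Pre_m2_to_correct sent annotations → Spec_m2_to_correct sent annotations (m2_to_correct sent annotations)

-- ===== LEMMAS AND PROOFS =====

-- A's slice assignment and B's splice are the same list operation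
lemma setSlice_eq_bSplice (xs : List String) (a b : Int) (repl : List String) :
    setSlice xs a b repl = bSplice xs a b repl := rfl

-- Python's list.insert is the splice with an empty removed span
lemma insert_eq_bSplice (xs : List String) (i : Int) (v : String) :
    PySem.List.insert xs i v = bSplice xs i i [v] := by
  simp only [PySem.List.insert, PySem.List.sliceIndices, bSplice, max_self]
  norm_num
  have hkk : (if i < 0 then max (i + (xs.length : Int)) 0 else min i (xs.length : Int)).toNat
      = PySem.List.clampIdx xs.length i := by
    simp only [PySem.List.clampIdx]
    split_ifs <;> omega
  rw [hkk]

lemma pyRange_nil_of_step_nonpos (a b s : Int) (hs : s ≤ 0) (hab : a ≤ b) :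
    PySem.List.pyRange a b s = [] := by
  simp only [PySem.List.pyRange]
  split_ifs <;> simp_all <;> omega

lemma pyRange_nil_of_ge (a b : Int) {s : Int} (hs : 0 < s) (hab : b ≤ a) :
    PySem.List.pyRange a b s = [] := by
  rw [PySem.List.pyRange_of_pos _ _ hs, if_neg (by omega)]
  simp

lemma pyRange_pos_cons (a b : Int) {s : Int} (hs : 0 < s) (hab : a < b) :
    PySem.List.pyRange a b s = a :: PySem.List.pyRange (a + s) b s := by
  rw [PySem.List.pyRange_of_pos _ _ hs, PySem.List.pyRange_of_pos _ _ hs, if_pos hab]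
  have key : ((b - a + s - 1) / s).toNat
      = (if a + s < b then ((b - (a + s) + s - 1) / s).toNat else 0) + 1 := by
    split_ifs with h
    · have e : b - a + s - 1 = (b - (a + s) + s - 1) + 1 * s := by ring
      rw [e, Int.add_mul_ediv_right _ _ (by omega)]
      have hnn : 0 ≤ (b - (a + s) + s - 1) / s := Int.ediv_nonneg (by omega) (by omega)
      omega
    · have h1 : PySem.Int.floordiv (b - a + s - 1) s = 1 := by
        rw [PySem.Int.floordiv_eq_iff_of_pos hs]
        constructor <;> omega
      rw [PySem.Int.floordiv_eq_ediv_of_pos hs] at h1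
      omega
  rw [key, List.range_succ_eq_map]
  simp only [List.map_cons, List.map_map, Nat.cast_zero, mul_zero, add_zero, List.cons.injEq,
    true_and]
  apply List.map_congr_left
  intro k _
  simp only [Function.comp_apply]
  push_cast
  ring

lemma pyRange_shift (a b x : Int) {s : Int} (hs : 0 < s) :
    PySem.List.pyRange (a + x) (b + x) s = (PySem.List.pyRange a b s).map (· + x) := by
  rw [PySem.List.pyRange_of_pos _ _ hs, PySem.List.pyRange_of_pos _ _ hs, List.map_map]
  have e : b + x - (a + x) + s - 1 = b - a + s - 1 := by ring
  simp only [Int.add_lt_add_iff_right, e]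
  apply List.map_congr_left
  intro k _
  simp only [Function.comp_apply]
  ring

-- A's range-stepped chunking equals B's greedy recursion, chunk size m ≥ 1
lemma chunks_eq (m : Nat) (hm : 1 ≤ m) : ∀ (n : Nat) (ws : List String), ws.length = n →
    ((PySem.List.pyRange 0 (ws.length : Int) (m : Int)).map
      (fun i => PySem.List.slice ws (some i) (some (i + (m : Int))))).map
      (fun g => PySem.Str.join " " g) = bChunks ws (m : Int) := by
  intro n
  induction n using Nat.strong_induction_on with
  | _ n ih =>
    intro ws hlen
    have hm0 : (0 : Int) < (m : Int) := by exact_mod_cast hm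
    by_cases hnil : ws = []
    · subst hnil
      rw [bChunks, dif_pos (Or.inl rfl)]
      simp [pyRange_nil_of_ge 0 0 hm0 le_rfl]
    · have hL : 0 < ws.length := List.length_pos_of_ne_nil hnil
      rw [bChunks, dif_neg (by push_neg; exact ⟨hnil, by omega⟩)]
      rw [pyRange_pos_cons 0 (ws.length : Int) hm0 (by exact_mod_cast hL)]
      simp only [List.map_cons, zero_add]
      congr 1
      rw [PySem.List.slice_some_none]
      have hclamp : PySem.List.clampIdx ws.length (m : Int) = min m ws.length := by
        simp [PySem.List.clampIdx]
      rw [hclamp]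
      by_cases hml : ws.length ≤ m
      · rw [pyRange_nil_of_ge _ _ hm0 (by exact_mod_cast hml)]
        rw [min_eq_right hml, List.drop_length, bChunks, dif_pos (Or.inl rfl)]
        simp
      · push_neg at hml
        rw [min_eq_left (by omega)]
        have hdlen : (ws.drop m).length = ws.length - m := by simp
        have hcast : (ws.length : Int) = ((ws.length - m : Nat) : Int) + (m : Int) := by
          push_cast; omega
        have hshift : PySem.List.pyRange (m : Int) (ws.length : Int) (m : Int)
            = (PySem.List.pyRange 0 ((ws.length - m : Nat) : Int) (m : Int)).map
                (· + (m : Int)) := by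
          have hsh := pyRange_shift 0 ((ws.length - m : Nat) : Int) (m : Int) hm0
          rw [zero_add, ← hcast] at hsh
          exact hsh
        rw [hshift, List.map_map, List.map_map]
        have hrec := ih (ws.length - m) (by omega) (ws.drop m) hdlen
        rw [← hdlen, ← hrec, List.map_map]
        apply List.map_congr_left
        intro i hi
        have h0i : 0 ≤ i := ((PySem.List.mem_pyRange_iff_of_pos hm0 i).1 hi).1
        simp only [Function.comp_apply]
        congr 1
        rw [PySem.List.slice_toNat _ (by omega) (by omega),
          PySem.List.slice_toNat _ (by omega) (by omega), List.drop_drop]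
        congr 1 <;> try omega
        congr 1
        omega

-- A's replacer equals B's replacement (every span length d)
lemma repl_eq (d : Int) (t : String) : mkReplacer d t = bReplacement d t := by
  simp only [mkReplacer, bReplacement]
  set ws := PySem.Str.split₀ (PySem.Str.strip t) with hws
  by_cases hd : d ≤ 0
  · rw [if_pos (show d - (ws.length : Int) ≤ 0 by omega), if_pos hd]
    have hstep : PySem.Int.floordiv (ws.length : Int) d ≤ 0 := by
      rcases eq_or_lt_of_le hd with h | h
      · rw [h]
        exact le_of_eq (by simp only [PySem.Int.floordiv, Int.fdiv_zero])
      · exact Int.fdiv_nonpos_of_nonneg_of_nonpos (Int.natCast_nonneg _) (by omega)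
    rw [pyRange_nil_of_step_nonpos _ _ _ hstep (Int.natCast_nonneg _)]
    rfl
  · push_neg at hd
    by_cases hlen : d ≤ (ws.length : Int)
    · rw [if_pos (show d - (ws.length : Int) ≤ 0 by omega), if_neg (show ¬ d ≤ 0 by omega),
        if_pos hlen]
      have hdeq : d = (d.toNat : Int) := by omega
      have hdiv : PySem.Int.floordiv (ws.length : Int) d = ((ws.length / d.toNat : Nat) : Int) := by
        rw [hdeq, PySem.Int.floordiv_natCast, Int.toNat_natCast]
      rw [hdiv]
      exact chunks_eq (ws.length / d.toNat) (Nat.one_le_div_iff (by omega) |>.2 (by omega))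
        ws.length ws rfl
    · rw [if_neg (show ¬ (d - (ws.length : Int) ≤ 0) by omega), if_neg (show ¬ d ≤ 0 by omega),
        if_neg hlen]

-- the opOrder key A attaches to an operation
def ordOf (op : String) : Int :=
  if op = "U" then 1 else if op = "R" then 2 else if op = "M" then 3 else 4

def projEdit (x : Int × Int × Int × String × String × String) : String × Int × Int × String :=
  (x.2.2.2.1, x.2.1, x.2.2.1, x.2.2.2.2.2)

-- wherever A parses successfully, B's parse is its projection
lemma parse_b_eq (a : String) (h : annOk a = true) :
    parse_b a = (parse_annotation a).map projEdit := by
  unfold annOk at h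
  simp only [Bool.and_eq_true, decide_eq_true_eq, Bool.or_eq_true, Bool.not_eq_true',
    Bool.and_eq_false_iff, decide_eq_false_iff_not] at h
  obtain ⟨⟨⟨⟨⟨h3, hfs⟩, hi1⟩, hi2⟩, hop⟩, -⟩ := h
  unfold parse_b parse_annotation
  rcases hsp : (PySem.Str.split? a "|||").getD [] with _ | ⟨f0, _ | ⟨f1, _ | ⟨f2, rest⟩⟩⟩ <;>
    rw [hsp] at h3 hfs hi1 hi2 hop <;> simp at h3
  simp only [List.getD_cons_zero, List.getD_cons_succ] at hfs hi1 hi2 hop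
  simp only [List.getElem?_cons_zero, List.getElem?_cons_succ]
  rcases hws : PySem.Str.split₀ f0 with _ | ⟨w0, _ | ⟨w1, _ | ⟨w2, _ | ⟨w3, ws⟩⟩⟩⟩ <;>
    rw [hws] at hfs hi1 hi2 <;> simp at hfs
  simp only [List.getD_cons_zero, List.getD_cons_succ] at hi1 hi2
  rw [PySem.List.slice_from_one]
  simp only [List.tail_cons]
  obtain ⟨st, hst⟩ := Option.isSome_iff_exists.1 hi1
  obtain ⟨en, hen⟩ := Option.isSome_iff_exists.1 hi2
  rw [hst, hen]
  rcases hop with (hop | hop) | hop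
  · by_cases h2 : 2 < ((PySem.Str.split? f1 ":").getD []).length
    · rw [if_pos (by omega), if_pos h2]
      simp [projEdit]
    · rw [if_pos (by omega), if_neg h2, if_pos (by omega)]
      simp [projEdit]
  · subst hop
    have he : (PySem.Str.split? "UNK" ":").getD [] = ["UNK"] := by decide
    rw [he]
    simp [projEdit]
  · subst hop
    have he : (PySem.Str.split? "noop" ":").getD [] = ["noop"] := by decide
    rw [he]
    simp [projEdit]

lemma parse_ord {a : String} {x : Int × Int × Int × String × String × String}
    (h : parse_annotation a = some x) : x.1 = ordOf x.2.2.2.1 := by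
  simp only [parse_annotation] at h
  repeat' split at h
  all_goals (try injection h with h; subst h)
  all_goals simp_all [ordOf]

lemma ordOf_eq_one_iff (op : String) : ordOf op = 1 ↔ op = "U" := by
  unfold ordOf; split_ifs <;> simp_all
lemma ordOf_eq_two_iff (op : String) : ordOf op = 2 ↔ op = "R" := by
  unfold ordOf; split_ifs <;> simp_all
lemma ordOf_eq_three_iff (op : String) : ordOf op = 3 ↔ op = "M" := by
  unfold ordOf; split_ifs <;> simp_all

lemma insertBy_append_not {α : Type} (before : α → α → Bool) (x : α) (as bs : List α)
    (h : ∀ y ∈ as, before x y = false) :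
    PySem.List.insertBy before x (as ++ bs) = as ++ PySem.List.insertBy before x bs := by
  induction as with
  | nil => simp
  | cons y ys ih =>
    simp only [List.cons_append, PySem.List.insertBy, h y (by simp)]
    simp [ih (fun z hz => h z (by simp [hz]))]

lemma insertBy_all_before {α : Type} (before : α → α → Bool) (x : α) (bs : List α)
    (h : ∀ y ∈ bs, before x y = true) :
    PySem.List.insertBy before x bs = x :: bs := by
  cases bs with
  | nil => rfl
  | cons y ys => simp [PySem.List.insertBy, h y (by simp)]

lemma insertBy_group {α : Type} (key : α → Int) (x : α) (g1 g2 : List α)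
    (h1 : ∀ y ∈ g1, ¬ key x < key y) (h2 : ∀ y ∈ g2, key x < key y) :
    PySem.List.insertBy (fun a b => decide (key a < key b)) x (g1 ++ g2) = g1 ++ x :: g2 := by
  rw [insertBy_append_not _ _ _ _ (fun y hy => by simpa using h1 y hy)]
  rw [insertBy_all_before _ _ _ (fun y hy => by simpa using h2 y hy)]

-- A's stable sort by a key in {1,2,3,4} is the concatenation of the four key groups in input order
lemma sorted_four (l : List (Int × Int × Int × String × String × String))
    (h : ∀ x ∈ l, x.1 = 1 ∨ x.1 = 2 ∨ x.1 = 3 ∨ x.1 = 4) :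
    PySem.List.sorted l (fun x => x.1) false =
      l.filter (fun x => x.1 == 1) ++ l.filter (fun x => x.1 == 2) ++
      l.filter (fun x => x.1 == 3) ++ l.filter (fun x => x.1 == 4) := by
  induction l using List.reverseRecOn with
  | nil => simp [PySem.List.sorted_eq_foldl_insertBy]
  | append_singleton l x ih =>
    have hx := h x (by simp)
    have hl : ∀ y ∈ l, y.1 = 1 ∨ y.1 = 2 ∨ y.1 = 3 ∨ y.1 = 4 := fun y hy => h y (by simp [hy])
    have hstep : PySem.List.sorted (l ++ [x]) (fun x => x.1) false
        = PySem.List.insertBy (fun a b => decide (a.1 < b.1)) x (PySem.List.sorted l (fun x => x.1) false) := by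
      rw [PySem.List.sorted_eq_foldl_insertBy, PySem.List.sorted_eq_foldl_insertBy, List.foldl_append]
      rfl
    rw [hstep, ih hl]
    have k1 : ∀ y ∈ l.filter (fun x => x.1 == 1), y.1 = 1 := by intro y hy; simpa using (List.of_mem_filter hy)
    have k2 : ∀ y ∈ l.filter (fun x => x.1 == 2), y.1 = 2 := by intro y hy; simpa using (List.of_mem_filter hy)
    have k3 : ∀ y ∈ l.filter (fun x => x.1 == 3), y.1 = 3 := by intro y hy; simpa using (List.of_mem_filter hy)
    have k4 : ∀ y ∈ l.filter (fun x => x.1 == 4), y.1 = 4 := by intro y hy; simpa using (List.of_mem_filter hy)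
    rcases hx with hx | hx | hx | hx
    · have e := insertBy_group (fun x => x.1) x (l.filter (fun x => x.1 == 1))
        (l.filter (fun x => x.1 == 2) ++ l.filter (fun x => x.1 == 3) ++ l.filter (fun x => x.1 == 4))
        (by intro y hy; have := k1 y hy; beta_reduce; omega)
        (by intro y hy
            simp only [List.append_assoc, List.mem_append] at hy
            rcases hy with hy | hy | hy
            · have := k2 y hy; beta_reduce; omega
            · have := k3 y hy; beta_reduce; omega
            · have := k4 y hy; beta_reduce; omega)
      simp only [List.append_assoc] at e ⊢
      rw [e]
      simp [List.filter_append, hx]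
    · have e := insertBy_group (fun x => x.1) x (l.filter (fun x => x.1 == 1) ++ l.filter (fun x => x.1 == 2))
        (l.filter (fun x => x.1 == 3) ++ l.filter (fun x => x.1 == 4))
        (by intro y hy
            simp only [List.mem_append] at hy
            rcases hy with hy | hy
            · have := k1 y hy; beta_reduce; omega
            · have := k2 y hy; beta_reduce; omega)
        (by intro y hy
            simp only [List.mem_append] at hy
            rcases hy with hy | hy
            · have := k3 y hy; beta_reduce; omega
            · have := k4 y hy; beta_reduce; omega)
      simp only [List.append_assoc] at e ⊢
      rw [e]
      simp [List.filter_append, hx]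
    · have e := insertBy_group (fun x => x.1) x (l.filter (fun x => x.1 == 1) ++ l.filter (fun x => x.1 == 2) ++ l.filter (fun x => x.1 == 3))
        (l.filter (fun x => x.1 == 4))
        (by intro y hy
            simp only [List.append_assoc, List.mem_append] at hy
            rcases hy with hy | hy | hy
            · have := k1 y hy; beta_reduce; omega
            · have := k2 y hy; beta_reduce; omega
            · have := k3 y hy; beta_reduce; omega)
        (by intro y hy; have := k4 y hy; beta_reduce; omega)
      simp only [List.append_assoc] at e ⊢
      rw [e]
      simp [List.filter_append, hx]
    · have e : ∀ y ∈ l.filter (fun x => x.1 == 1) ++ l.filter (fun x => x.1 == 2) ++ l.filter (fun x => x.1 == 3) ++ l.filter (fun x => x.1 == 4),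
          (fun a b => decide ((a : Int × Int × Int × String × String × String).1 < b.1)) x y = false := by
        intro y hy
        simp only [List.append_assoc, List.mem_append] at hy
        rcases hy with hy | hy | hy | hy
        · have := k1 y hy; simp; omega
        · have := k2 y hy; simp; omega
        · have := k3 y hy; simp; omega
        · have := k4 y hy; simp; omega
      rw [PySem.List.insertBy_of_forall_not_before _ _ _ e]
      simp [List.filter_append, hx]

-- pointwise steps of B's three closures (proof-side views of bStep's branches)
def uStep (t : List String) (ed : String × Int × Int × String) : List String :=
  if ed.1 = "U" then bSplice t ed.2.1 ed.2.2.1 (List.replicate (ed.2.2.1 - ed.2.1).toNat "") else t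

def rStep (t : List String) (ed : String × Int × Int × String) : List String :=
  if ed.1 = "R" then bSplice t ed.2.1 ed.2.2.1 (bReplacement (ed.2.2.1 - ed.2.1) ed.2.2.2) else t

def mStep (t : List String) (ed : String × Int × Int × String) : List String :=
  if ed.1 = "M" then bSplice t ed.2.1 ed.2.1 [ed.2.2.2] else t

-- the closures accumulated by bStep are the fold of the pointwise steps
lemma fold_closures (eds : List (String × Int × Int × String))
    (fu fr fm : List String → List String) (l : List String) :
    (eds.foldl bStep (fu, fr, fm)).1 l = eds.foldl uStep (fu l)
    ∧ (eds.foldl bStep (fu, fr, fm)).2.1 l = eds.foldl rStep (fr l)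
    ∧ (eds.foldl bStep (fu, fr, fm)).2.2 l = eds.foldl mStep (fm l) := by
  induction eds generalizing fu fr fm with
  | nil => simp
  | cons ed rest ih =>
    simp only [List.foldl_cons, bStep, uStep, rStep, mStep]
    split_ifs with h1 h2 h3 <;>
      simp_all [ih]

lemma fold_groupU (l : List (Int × Int × Int × String × String × String)) (t : List String)
    (h : ∀ x ∈ l, x.1 = ordOf x.2.2.2.1) :
    (l.filter (fun x => x.1 == 1)).foldl applyAnnot t = (l.map projEdit).foldl uStep t := by
  induction l generalizing t with
  | nil => simp
  | cons x l ih =>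
    have hx := h x (by simp)
    have hl : ∀ y ∈ l, y.1 = ordOf y.2.2.2.1 := fun y hy => h y (by simp [hy])
    by_cases hop : x.2.2.2.1 = "U"
    · have h1 : x.1 = 1 := by rw [hx, hop]; rfl
      simp only [List.filter_cons, List.map_cons, List.foldl_cons, h1]
      rw [if_pos (by simp)]
      simp only [List.foldl_cons]
      rw [show applyAnnot t x = uStep t (projEdit x) by
        simp [applyAnnot, uStep, projEdit, hop, setSlice_eq_bSplice]]
      exact ih _ hl
    · have h1 : (x.1 == 1) = false := by
        simp only [beq_eq_false_iff_ne, ne_eq, hx]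
        intro c; exact hop ((ordOf_eq_one_iff _).1 c)
      simp only [List.filter_cons, h1, List.map_cons, List.foldl_cons, Bool.false_eq_true, if_false]
      rw [show uStep t (projEdit x) = t by simp [uStep, projEdit, hop]]
      exact ih _ hl

lemma fold_groupR (l : List (Int × Int × Int × String × String × String)) (t : List String)
    (h : ∀ x ∈ l, x.1 = ordOf x.2.2.2.1) :
    (l.filter (fun x => x.1 == 2)).foldl applyAnnot t = (l.map projEdit).foldl rStep t := by
  induction l generalizing t with
  | nil => simp
  | cons x l ih =>
    have hx := h x (by simp)
    have hl : ∀ y ∈ l, y.1 = ordOf y.2.2.2.1 := fun y hy => h y (by simp [hy])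
    by_cases hop : x.2.2.2.1 = "R"
    · have h1 : x.1 = 2 := by rw [hx, hop]; rfl
      simp only [List.filter_cons, List.map_cons, List.foldl_cons, h1]
      rw [if_pos (by simp)]
      simp only [List.foldl_cons]
      rw [show applyAnnot t x = rStep t (projEdit x) by
        simp [applyAnnot, rStep, projEdit, hop, setSlice_eq_bSplice, repl_eq]]
      exact ih _ hl
    · have h1 : (x.1 == 2) = false := by
        simp only [beq_eq_false_iff_ne, ne_eq, hx]
        intro c; exact hop ((ordOf_eq_two_iff _).1 c)
      simp only [List.filter_cons, h1, List.map_cons, List.foldl_cons, Bool.false_eq_true, if_false]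
      rw [show rStep t (projEdit x) = t by simp [rStep, projEdit, hop]]
      exact ih _ hl

lemma fold_groupM (l : List (Int × Int × Int × String × String × String)) (t : List String)
    (h : ∀ x ∈ l, x.1 = ordOf x.2.2.2.1) :
    (l.filter (fun x => x.1 == 3)).foldl applyAnnot t = (l.map projEdit).foldl mStep t := by
  induction l generalizing t with
  | nil => simp
  | cons x l ih =>
    have hx := h x (by simp)
    have hl : ∀ y ∈ l, y.1 = ordOf y.2.2.2.1 := fun y hy => h y (by simp [hy])
    by_cases hop : x.2.2.2.1 = "M"
    · have h1 : x.1 = 3 := by rw [hx, hop]; rfl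
      simp only [List.filter_cons, List.map_cons, List.foldl_cons, h1]
      rw [if_pos (by simp)]
      simp only [List.foldl_cons]
      rw [show applyAnnot t x = mStep t (projEdit x) by
        simp [applyAnnot, mStep, projEdit, hop, insert_eq_bSplice]]
      exact ih _ hl
    · have h1 : (x.1 == 3) = false := by
        simp only [beq_eq_false_iff_ne, ne_eq, hx]
        intro c; exact hop ((ordOf_eq_three_iff _).1 c)
      simp only [List.filter_cons, h1, List.map_cons, List.foldl_cons, Bool.false_eq_true, if_false]
      rw [show mStep t (projEdit x) = t by simp [mStep, projEdit, hop]]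
      exact ih _ hl

lemma fold_group4 (l : List (Int × Int × Int × String × String × String)) (t : List String)
    (h : ∀ x ∈ l, x.1 = ordOf x.2.2.2.1) :
    (l.filter (fun x => x.1 == 4)).foldl applyAnnot t = t := by
  induction l generalizing t with
  | nil => simp
  | cons x l ih =>
    have hx := h x (by simp)
    have hl : ∀ y ∈ l, y.1 = ordOf y.2.2.2.1 := fun y hy => h y (by simp [hy])
    by_cases h4 : x.1 = 4
    · have hR : x.2.2.2.1 ≠ "R" := fun c => by rw [hx, (c : _ = "R")] at h4; exact absurd h4 (by decide)
      have hU : x.2.2.2.1 ≠ "U" := fun c => by rw [hx, (c : _ = "U")] at h4; exact absurd h4 (by decide)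
      have hM : x.2.2.2.1 ≠ "M" := fun c => by rw [hx, (c : _ = "M")] at h4; exact absurd h4 (by decide)
      simp only [List.filter_cons, h4]
      rw [if_pos (by simp)]
      simp only [List.foldl_cons]
      rw [show applyAnnot t x = t by simp [applyAnnot, hR, hU, hM]]
      exact ih _ hl
    · have h1 : (x.1 == 4) = false := by simpa using h4
      simp only [List.filter_cons, h1, Bool.false_eq_true, if_false]
      exact ih _ hl

-- evaluating B's composed closures is the three-stage fold of the pointwise steps
lemma alt_eval (E : List (String × Int × Int × String)) (tokens : List String) :
    ((E.foldl bStep ((fun l => l), (fun l => l), (fun l => l))).2.2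
      ((E.foldl bStep ((fun l => l), (fun l => l), (fun l => l))).2.1
        ((E.foldl bStep ((fun l => l), (fun l => l), (fun l => l))).1 tokens)))
    = E.foldl mStep (E.foldl rStep (E.foldl uStep tokens)) := by
  obtain ⟨e1, -, -⟩ := fold_closures E (fun l => l) (fun l => l) (fun l => l) tokens
  simp only [e1]
  obtain ⟨-, e2, -⟩ := fold_closures E (fun l => l) (fun l => l) (fun l => l)
    (E.foldl uStep tokens)
  simp only [e2]
  obtain ⟨-, -, e3⟩ := fold_closures E (fun l => l) (fun l => l) (fun l => l)
    (E.foldl rStep (E.foldl uStep tokens))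
  simp only [e3]

lemma ports_eq (sent : String) (annotations : List String)
    (hpre : ∀ a ∈ annotations, annOk a = true) :
    m2_to_correct sent annotations = m2_to_correct_alt sent annotations := by
  simp only [m2_to_correct, m2_to_correct_alt]
  have hmap : annotations.filterMap parse_b
      = (annotations.filterMap parse_annotation).map projEdit := by
    rw [List.map_filterMap]
    exact List.filterMap_congr (fun a ha => by rw [parse_b_eq a (hpre a ha)])
  have hinv : ∀ x ∈ annotations.filterMap parse_annotation, x.1 = ordOf x.2.2.2.1 := by
    intro x hx
    obtain ⟨a, _, ha⟩ := List.mem_filterMap.1 hx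
    exact parse_ord ha
  have h4 : ∀ x ∈ annotations.filterMap parse_annotation,
      x.1 = 1 ∨ x.1 = 2 ∨ x.1 = 3 ∨ x.1 = 4 := by
    intro x hx
    have := hinv x hx
    unfold ordOf at this
    split_ifs at this <;> omega
  rw [hmap, alt_eval, sorted_four _ h4, List.foldl_append, List.foldl_append, List.foldl_append,
    fold_groupU _ _ hinv, fold_groupR _ _ hinv, fold_groupM _ _ hinv, fold_group4 _ _ hinv]

-- ===== VERDICT (by name: the statement is the Claim_ definition above) =====
theorem m2_to_correct_spec : Claim_equal_m2_to_correct := by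
  intro sent annotations _ hpre
  unfold Spec_m2_to_correct
  exact ports_eq sent annotations hpre
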